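-- pv_equiv track=rewrite | github.com/thepratholic/Competitive-Programming | LeetCode/Biweekly Contest 177/Merge Close Characters.py | mergeCharacters
-- ===== SOURCE A (Python) =====
-- def mergeCharacters(s: str, k: int) -> str:
--     result = []
--     pos = {}
--
--     for ch in s:
--         if ch not in pos:
--             pos[ch] = []
--
--         merged = False
--
--         if pos[ch]:
--             last_index = pos[ch][-1]
--             if len(result) - last_index <= k:
--                 merged = True
--
--         if not merged:
--             pos[ch].append(len(result))
--             result.append(ch)
--
--     return "".join(result)
-- ===== SOURCE B (Python) =====
-- def mergeCharacters(s: str, k: int) -> str: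
--     out = []
--     cooldown = {}  # ch -> number of further appends during which ch is still merged
--     for ch in s:
--         if cooldown.get(ch, 0) > 0:
--             continue
--         out.append(ch)
--         # one append happened: age every active cooldown, drop the expired ones
--         cooldown = {c: n - 1 for c, n in cooldown.items() if n > 1}
--         cooldown[ch] = k
--     return ''.join(out)
-- ===== Notes on version B (the rewrite author's own statement) =====
-- stated objective: faster
-- what changed: Replaces A's dict of ever-growing per-character append-position lists (merge test: current output length minus stored last position) by a small table of aging cooldown counters: each kept character gets a counter of remaining appends during which it is merged, all counters are decremented and expired ones dropped on every append, so no positions or output lengths are ever stored or compared.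
import Mathlib
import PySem

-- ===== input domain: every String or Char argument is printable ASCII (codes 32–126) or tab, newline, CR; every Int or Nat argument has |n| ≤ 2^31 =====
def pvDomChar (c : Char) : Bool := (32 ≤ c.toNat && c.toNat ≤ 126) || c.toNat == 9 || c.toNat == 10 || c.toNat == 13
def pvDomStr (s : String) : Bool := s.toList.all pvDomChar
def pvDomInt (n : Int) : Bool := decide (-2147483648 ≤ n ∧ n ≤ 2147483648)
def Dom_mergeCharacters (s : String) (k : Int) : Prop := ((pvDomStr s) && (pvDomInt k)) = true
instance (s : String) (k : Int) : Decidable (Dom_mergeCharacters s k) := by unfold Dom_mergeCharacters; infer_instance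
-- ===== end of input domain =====

-- B replaces A's dict of per-character append-position lists by a table of aging cooldown
-- counters for the recently kept characters (alternative mechanism, no position arithmetic);
-- return values agree on all inputs.

-- ===== PORT A =====
-- A's merged flag: "pos[ch] is nonempty and len(result) - pos[ch][-1] <= k"
def mergeMergedA (k : Int) (resultLen : Int) (l : List Int) : Bool :=
  match PySem.List.pyGet? l (-1) with                                -- if pos[ch]: last_index = pos[ch][-1]
  | some last_index => decide (resultLen - last_index ≤ k)
  | none => false

-- one iteration of A's loop body; state = (result, pos)
def mergeStepA (k : Int) (st : List Char × PySem.Dict Char (List Int)) (ch : Char) :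
    List Char × PySem.Dict Char (List Int) :=
  let result := st.1
  let pos := if st.2.contains ch then st.2 else st.2.insert ch []    -- if ch not in pos: pos[ch] = []
  let merged : Bool := mergeMergedA k (result.length : Int) (pos.getD ch [])
  if merged then (result, pos)
  else (result ++ [ch], pos.modify ch [] (fun l => l ++ [(result.length : Int)]))

def mergeCharacters (s : String) (k : Int) : String :=
  String.ofList (s.toList.foldl (mergeStepA k) ([], PySem.Dict.empty)).1

-- ===== PORT B =====
-- the dict comprehension {c: n - 1 for c, n in cooldown.items() if n > 1}
def coolAge (cd : PySem.Dict Char Int) : PySem.Dict Char Int :=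
  PySem.Dict.ofList ((cd.items.filter (fun p => decide (1 < p.2))).map (fun p => (p.1, p.2 - 1)))

-- one iteration of B's loop body; state = (out, cooldown)
def coolStep (k : Int) (st : List Char × PySem.Dict Char Int) (ch : Char) :
    List Char × PySem.Dict Char Int :=
  if 0 < st.2.getD ch 0 then st                                      -- if cooldown.get(ch, 0) > 0: continue
  else (st.1 ++ [ch], (coolAge st.2).insert ch k)                    -- append; age the counters; cooldown[ch] = k

def mergeCharacters_alt (s : String) (k : Int) : String :=
  String.ofList (s.toList.foldl (coolStep k) ([], PySem.Dict.empty)).1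

-- ===== PRECONDITION & SPEC =====
def Spec_mergeCharacters (s : String) (k : Int) (out : String) : Prop := out = mergeCharacters_alt s k
instance (s : String) (k : Int) (out : String) : Decidable (Spec_mergeCharacters s k out) := by unfold Spec_mergeCharacters; infer_instance

-- ===== CLAIM (what is proved, stated in full; the proofs are below) =====
def Claim_equal_mergeCharacters : Prop := ∀ (s : String) (k : Int), Dom_mergeCharacters s k → Spec_mergeCharacters s k (mergeCharacters s k)

-- ===== LEMMAS AND PROOFS =====

lemma pyGet_neg_one_eq_getLast? {α : Type} (l : List α) :
    PySem.List.pyGet? l (-1) = l.getLast? := by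
  simp [pysem]

-- invariant tying B's cooldown table to A's position dict and the current output length:
-- each counter equals its character's remaining merge budget k + L + 1 - |r|
-- (L = last recorded append position) while positive or freshly inserted, else 0.
def CoolInv (k : Int) (r : List Char) (pos : PySem.Dict Char (List Int))
    (cd : PySem.Dict Char Int) : Prop :=
  cd.keys.Nodup ∧ ∀ ch : Char,
    match (pos.getD ch []).getLast? with
    | none => cd.getD ch 0 = 0
    | some L => L < (r.length : Int) ∧
        cd.getD ch 0 =
          (if 1 ≤ k + L + 1 - (r.length : Int) ∨ (r.length : Int) = L + 1
           then k + L + 1 - (r.length : Int) else 0)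

lemma coolInv_empty (k : Int) : CoolInv k [] PySem.Dict.empty PySem.Dict.empty := by
  refine ⟨by simp [PySem.Dict.keys_empty], fun ch => ?_⟩
  rw [PySem.Dict.getD_empty]
  simp [PySem.Dict.getD_empty]

lemma items_coolAge (cd : PySem.Dict Char Int) (hnd : cd.keys.Nodup) :
    (coolAge cd).items
      = (cd.items.filter (fun p => decide (1 < p.2))).map (fun p => (p.1, p.2 - 1)) := by
  have hkeys : (((cd.items.filter (fun p => decide (1 < p.2))).map
      (fun p => (p.1, p.2 - 1))).map Prod.fst).Nodup := by
    have hsub : ((cd.items.filter (fun p => decide (1 < p.2))).map Prod.fst).Sublist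
        (cd.items.map Prod.fst) := List.Sublist.map Prod.fst List.filter_sublist
    have heq : ((cd.items.filter (fun p => decide (1 < p.2))).map
        (fun p => (p.1, p.2 - 1))).map Prod.fst
        = (cd.items.filter (fun p => decide (1 < p.2))).map Prod.fst := by
      simp
    rw [heq]
    exact hsub.nodup hnd
  unfold coolAge PySem.Dict.ofList PySem.Dict.update
  rw [PySem.Dict.items_foldl_insert_fresh _ _ _ _
    (fun a _ => PySem.Dict.contains_empty _) hkeys]
  simp [PySem.Dict.empty, Function.comp]

lemma keys_coolAge (cd : PySem.Dict Char Int) (hnd : cd.keys.Nodup) :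
    (coolAge cd).keys = (cd.items.filter (fun p => decide (1 < p.2))).map Prod.fst := by
  unfold PySem.Dict.keys
  rw [items_coolAge cd hnd]
  simp

lemma nodup_keys_coolAge (cd : PySem.Dict Char Int) (hnd : cd.keys.Nodup) :
    (coolAge cd).keys.Nodup := by
  rw [keys_coolAge cd hnd]
  have hsub : ((cd.items.filter (fun p => decide (1 < p.2))).map Prod.fst).Sublist
      (cd.items.map Prod.fst) := List.Sublist.map Prod.fst List.filter_sublist
  exact hsub.nodup hnd

-- the aged table reads as "decrement if above 1, else gone"
lemma getD_coolAge (cd : PySem.Dict Char Int) (hnd : cd.keys.Nodup) (c : Char) :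
    (coolAge cd).getD c 0 = if 1 < cd.getD c 0 then cd.getD c 0 - 1 else 0 := by
  cases hg : cd.get? c with
  | none =>
    have h0 : cd.getD c 0 = 0 := by rw [PySem.Dict.getD_eq_get?_getD, hg]; rfl
    rw [h0]
    have hmem : c ∉ (coolAge cd).keys := by
      rw [keys_coolAge cd hnd]
      intro hc
      obtain ⟨p, hpf, hp1⟩ := List.mem_map.mp hc
      have hpi : p ∈ cd.items := List.mem_of_mem_filter hpf
      have hck : c ∈ cd.keys := by
        unfold PySem.Dict.keys
        exact List.mem_map.mpr ⟨p, hpi, hp1⟩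
      exact (PySem.Dict.get?_eq_none_iff_not_mem_keys _ _).mp hg hck
    rw [PySem.Dict.getD_eq_get?_getD,
      (PySem.Dict.get?_eq_none_iff_not_mem_keys _ _).mpr hmem]
    norm_num
  | some w =>
    have hw : cd.getD c 0 = w := by rw [PySem.Dict.getD_eq_get?_getD, hg]; rfl
    have hmemi : (c, w) ∈ cd.items := PySem.Dict.mem_items_of_get?_eq_some cd hg
    rw [hw]
    by_cases h1 : 1 < w
    · have hin : (c, w - 1) ∈ (coolAge cd).items := by
        rw [items_coolAge cd hnd]
        exact List.mem_map.mpr ⟨(c, w),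
          List.mem_filter.mpr ⟨hmemi, by simpa using h1⟩, rfl⟩
      rw [PySem.Dict.getD_of_mem_items _ hin (nodup_keys_coolAge cd hnd), if_pos h1]
    · have hmem : c ∉ (coolAge cd).keys := by
        rw [keys_coolAge cd hnd]
        intro hc
        obtain ⟨p, hpf, hp1⟩ := List.mem_map.mp hc
        have hpi : p ∈ cd.items := List.mem_of_mem_filter hpf
        have hpv : 1 < p.2 := by
          have := (List.mem_filter.mp hpf).2
          simpa using this
        have hp : p = (c, p.2) := by
          rw [← hp1]
        rw [hp] at hpi
        have := PySem.Dict.get?_of_mem_items cd hpi hnd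
        rw [hg] at this
        have : p.2 = w := by injection this.symm
        omega
      rw [PySem.Dict.getD_eq_get?_getD,
        (PySem.Dict.get?_eq_none_iff_not_mem_keys _ _).mpr hmem, if_neg h1]
      rfl

-- one step: outputs stay equal and the invariant is preserved
lemma step_agree (k : Int) (pos : PySem.Dict Char (List Int)) (cd : PySem.Dict Char Int)
    (r : List Char) (ch : Char) (h : CoolInv k r pos cd) :
    (mergeStepA k (r, pos) ch).1 = (coolStep k (r, cd) ch).1 ∧
    CoolInv k (mergeStepA k (r, pos) ch).1 (mergeStepA k (r, pos) ch).2
      (coolStep k (r, cd) ch).2 := by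
  obtain ⟨hnd, hinv⟩ := h
  unfold mergeStepA coolStep
  simp only []
  set pos' := if pos.contains ch then pos else pos.insert ch [] with hpos'
  have hgd' : ∀ c : Char, pos'.getD c [] = pos.getD c [] := by
    intro c
    rw [hpos']
    split
    · rfl
    · rename_i hnc
      by_cases hc : c = ch
      · subst hc
        rw [PySem.Dict.getD_insert_self,
          PySem.Dict.getD_of_not_contains _ _ (by simpa using hnc)]
      · exact PySem.Dict.getD_insert_of_ne _ _ _ hc
  have hcond : mergeMergedA k (r.length : Int) (pos'.getD ch []) = true
      ↔ 0 < cd.getD ch 0 := by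
    rw [hgd' ch]
    unfold mergeMergedA
    rw [pyGet_neg_one_eq_getLast?]
    have hch := hinv ch
    cases hL : (pos.getD ch []).getLast? with
    | none =>
      rw [hL] at hch
      simp [hch]
    | some L =>
      rw [hL] at hch
      obtain ⟨hLr, hval⟩ := hch
      simp only [decide_eq_true_eq]
      rw [hval]
      split_ifs <;> omega
  by_cases hb : 0 < cd.getD ch 0
  · rw [if_pos (hcond.mpr hb), if_pos hb]
    refine ⟨rfl, hnd, fun c => ?_⟩
    rw [hgd' c]
    exact hinv c
  · rw [if_neg (fun hc => hb (hcond.mp hc)), if_neg hb]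
    refine ⟨rfl, PySem.Dict.nodup_keys_insert _ _ _ (nodup_keys_coolAge cd hnd), fun c => ?_⟩
    by_cases hc : c = ch
    · subst hc
      rw [PySem.Dict.getD_modify_self, hgd' c, List.getLast?_concat,
        PySem.Dict.getD_insert_self]
      simp only [List.length_append, List.length_cons, List.length_nil]
      push_cast
      refine ⟨by omega, ?_⟩
      rw [if_pos (Or.inr (by ring))]
      ring
    · rw [PySem.Dict.getD_modify_of_ne _ _ _ hc, hgd' c,
        PySem.Dict.getD_insert_of_ne _ _ _ hc, getD_coolAge cd hnd c]
      have hc2 := hinv c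
      cases hL : (pos.getD c []).getLast? with
      | none =>
        rw [hL] at hc2
        rw [hc2]
        norm_num
      | some L =>
        rw [hL] at hc2
        obtain ⟨hLr, hval⟩ := hc2
        simp only [List.length_append, List.length_cons, List.length_nil]
        push_cast
        refine ⟨by omega, ?_⟩
        rw [hval]
        split_ifs <;> omega

lemma fold_agree (k : Int) (cs : List Char) :
    ∀ (r : List Char) (pos : PySem.Dict Char (List Int)) (cd : PySem.Dict Char Int),
      CoolInv k r pos cd →
      (cs.foldl (mergeStepA k) (r, pos)).1 = (cs.foldl (coolStep k) (r, cd)).1 := by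
  induction cs with
  | nil => intro r pos cd _; rfl
  | cons c t ih =>
    intro r pos cd h
    obtain ⟨heq, hinv⟩ := step_agree k pos cd r c h
    simp only [List.foldl_cons]
    have hA : mergeStepA k (r, pos) c
        = ((mergeStepA k (r, pos) c).1, (mergeStepA k (r, pos) c).2) := rfl
    have hB : coolStep k (r, cd) c
        = ((mergeStepA k (r, pos) c).1, (coolStep k (r, cd) c).2) := by
      rw [heq]
    rw [hA, hB]
    exact ih _ _ _ hinv

-- ===== VERDICT (by name: the statement is the Claim_ definition above) =====
theorem mergeCharacters_spec : Claim_equal_mergeCharacters := by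
  intro s k _
  unfold Spec_mergeCharacters mergeCharacters mergeCharacters_alt
  rw [fold_agree k s.toList [] PySem.Dict.empty PySem.Dict.empty (coolInv_empty k)]
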